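-- pv_equiv track=rewrite | github.com/TangoMan75/python-lab | hyper_log_log/hyper_log_log.py | count_leading_zeros
-- ===== SOURCE A (Python) =====
-- def count_leading_zeros(binary_string):
--     """count_leading_zeros"""
--     count = 0
--     for bit in binary_string:
--         if bit == '0':
--             count += 1
--         else:
--             break
--     return count
-- ===== SOURCE B (Python) =====
-- def count_leading_zeros(binary_string):
--     """count_leading_zeros"""
--     return len(binary_string) - len(binary_string.lstrip('0'))
-- ===== Notes on version B (the rewrite author's own statement) =====
-- stated objective: idiomatic
-- what changed: Replaces the explicit counting loop with a single string-method computation: total length minus the length after left-stripping the leading run of zero characters.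
import Mathlib
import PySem

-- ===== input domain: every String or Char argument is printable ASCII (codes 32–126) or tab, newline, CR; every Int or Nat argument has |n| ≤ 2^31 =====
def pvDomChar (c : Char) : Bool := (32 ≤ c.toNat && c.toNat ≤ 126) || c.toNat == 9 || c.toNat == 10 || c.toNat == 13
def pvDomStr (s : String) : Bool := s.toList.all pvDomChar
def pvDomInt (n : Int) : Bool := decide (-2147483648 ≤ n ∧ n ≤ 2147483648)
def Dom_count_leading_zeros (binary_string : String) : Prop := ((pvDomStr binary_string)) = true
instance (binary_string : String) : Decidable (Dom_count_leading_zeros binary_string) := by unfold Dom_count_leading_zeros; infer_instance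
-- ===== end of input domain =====

-- B replaces A's count-and-break loop with len(s) - len(s.lstrip('0')) (idiomatic, same cost).

-- ===== PORT A =====
-- the for-loop with break: count a leading '0', stop at the first other character
def countLoopA : List Char → Int
  | [] => 0
  | c :: rest => if c = '0' then 1 + countLoopA rest else 0

def count_leading_zeros (binary_string : String) : Int :=
  countLoopA binary_string.toList

-- ===== PORT B =====
-- s.lstrip('0') removes exactly the leading run of '0' characters: List.dropWhile (· == '0') is exact for it
def count_leading_zeros_alt (binary_string : String) : Int :=
  (binary_string.toList.length : Int) -
    ((binary_string.toList.dropWhile (· == '0')).length : Int)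

-- ===== PRECONDITION & SPEC =====
def Spec_count_leading_zeros (binary_string : String) (out : Int) : Prop := out = count_leading_zeros_alt binary_string
instance (binary_string : String) (out : Int) : Decidable (Spec_count_leading_zeros binary_string out) := by unfold Spec_count_leading_zeros; infer_instance

-- ===== CLAIM (what is proved, stated in full; the proofs are below) =====
def Claim_equal_count_leading_zeros : Prop := ∀ (binary_string : String), Dom_count_leading_zeros binary_string → Spec_count_leading_zeros binary_string (count_leading_zeros binary_string)

-- ===== LEMMAS AND PROOFS =====
theorem countLoopA_eq (l : List Char) :
    countLoopA l = (l.length : Int) - ((l.dropWhile (· == '0')).length : Int) := by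
  induction l with
  | nil => simp [countLoopA]
  | cons c rest ih =>
    by_cases h : c = '0'
    · simp [countLoopA, h, List.dropWhile, ih]
      have := List.length_dropWhile_le (p := (· == '0')) (l := rest)
      omega
    · have hb : (c == '0') = false := by simp [h]
      simp [countLoopA, h, List.dropWhile, hb]

-- ===== VERDICT (by name: the statement is the Claim_ definition above) =====
theorem count_leading_zeros_spec : Claim_equal_count_leading_zeros := by
  intro s _
  unfold Spec_count_leading_zeros count_leading_zeros count_leading_zeros_alt
  exact countLoopA_eq s.toList
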